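-- pv_equiv track=rewrite | github.com/SADHIK0512/TarvelGoo | zoroo/app.py | get_transport_details
-- ===== SOURCE A (Python) =====
-- bus_data = [
--     {"id": "B1", "name": "Super Luxury Bus", "source": "Hyderabad", "dest": "Bangalore", "price": 800},
--     {"id": "B2", "name": "Express Bus", "source": "Chennai", "dest": "Hyderabad", "price": 700}
-- ]
--
-- train_data = [
--     {"id": "T1", "name": "Rajdhani Express", "source": "Hyderabad", "dest": "Delhi", "price": 1500},
--     {"id": "T2", "name": "Shatabdi Express", "source": "Chennai", "dest": "Bangalore", "price": 900}
-- ]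
--
-- flight_data = [
--     {"id": "F1", "name": "Indigo 6E203", "source": "Hyderabad", "dest": "Dubai", "price": 8500},
--     {"id": "F2", "name": "Air India AI102", "source": "Delhi", "dest": "Singapore", "price": 9500}
-- ]
--
-- hotel_data = [
--     {"id": "H1", "name": "Grand Palace", "city": "Chennai", "type": "Luxury", "price": 4000},
--     {"id": "H2", "name": "Budget Inn", "city": "Hyderabad", "type": "Budget", "price": 1500}
-- ]
--
-- def get_transport_details(t_id):
--     all_transport = bus_data + train_data + flight_data
--     for t in all_transport:
--         if t['id'] == t_id:
--             return f"{t['name']} | {t['source']} - {t['dest']}"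
--     for h in hotel_data:
--         if h['id'] == t_id:
--             return f"{h['name']} | {h['city']} ({h['type']})"
--     return "Transport Details"
-- ===== SOURCE B (Python) =====
-- _DETAILS = {
--     "B1": "Super Luxury Bus | Hyderabad - Bangalore",
--     "B2": "Express Bus | Chennai - Hyderabad",
--     "T1": "Rajdhani Express | Hyderabad - Delhi",
--     "T2": "Shatabdi Express | Chennai - Bangalore",
--     "F1": "Indigo 6E203 | Hyderabad - Dubai",
--     "F2": "Air India AI102 | Delhi - Singapore",
--     "H1": "Grand Palace | Chennai (Luxury)",
--     "H2": "Budget Inn | Hyderabad (Budget)",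
-- }
--
-- def get_transport_details(t_id):
--     return _DETAILS.get(t_id, "Transport Details")
-- ===== Notes on version B (the rewrite author's own statement) =====
-- stated objective: idiomatic
-- what changed: Replaces the two sequential list scans with branch-by-branch formatting by a single precomputed id->detail dict and one .get lookup with the default.
import Mathlib
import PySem

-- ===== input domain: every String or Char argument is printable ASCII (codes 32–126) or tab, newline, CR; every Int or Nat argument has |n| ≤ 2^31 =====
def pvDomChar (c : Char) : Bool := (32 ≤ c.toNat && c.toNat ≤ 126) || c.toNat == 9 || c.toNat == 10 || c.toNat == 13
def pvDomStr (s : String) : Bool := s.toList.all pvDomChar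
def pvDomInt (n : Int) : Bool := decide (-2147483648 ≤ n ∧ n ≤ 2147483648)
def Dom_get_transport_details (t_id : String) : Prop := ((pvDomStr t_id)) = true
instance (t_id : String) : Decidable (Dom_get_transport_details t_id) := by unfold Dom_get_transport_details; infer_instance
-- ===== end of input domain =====

-- B replaces A's two sequential scans with one precomputed id->detail dict and a single .get lookup (idiomatic).


-- ===== PORT A =====
-- module-level data, as (id, name, source, dest) resp. (id, name, city, type); price unused by the function
def pvBusData : List (String × String × String × String) :=
  [("B1", "Super Luxury Bus", "Hyderabad", "Bangalore"),
   ("B2", "Express Bus", "Chennai", "Hyderabad")]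
def pvTrainData : List (String × String × String × String) :=
  [("T1", "Rajdhani Express", "Hyderabad", "Delhi"),
   ("T2", "Shatabdi Express", "Chennai", "Bangalore")]
def pvFlightData : List (String × String × String × String) :=
  [("F1", "Indigo 6E203", "Hyderabad", "Dubai"),
   ("F2", "Air India AI102", "Delhi", "Singapore")]
def pvHotelData : List (String × String × String × String) :=
  [("H1", "Grand Palace", "Chennai", "Luxury"),
   ("H2", "Budget Inn", "Hyderabad", "Budget")]

-- first for-loop with early return
def pvScanTransport (xs : List (String × String × String × String)) (t_id : String) : Option String :=
  match xs with
  | [] => none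
  | (i, n, s, d) :: rest =>
    if i == t_id then some (n ++ " | " ++ s ++ " - " ++ d) else pvScanTransport rest t_id

-- second for-loop with early return
def pvScanHotel (xs : List (String × String × String × String)) (t_id : String) : Option String :=
  match xs with
  | [] => none
  | (i, n, c, ty) :: rest =>
    if i == t_id then some (n ++ " | " ++ c ++ " (" ++ ty ++ ")") else pvScanHotel rest t_id

def get_transport_details (t_id : String) : String :=
  match pvScanTransport (pvBusData ++ pvTrainData ++ pvFlightData) t_id with
  | some r => r
  | none =>
    match pvScanHotel pvHotelData t_id with
    | some r => r
    | none => "Transport Details"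

-- ===== PORT B =====
def pvDetails : PySem.Dict String String :=
  PySem.Dict.ofList
    [("B1", "Super Luxury Bus | Hyderabad - Bangalore"),
     ("B2", "Express Bus | Chennai - Hyderabad"),
     ("T1", "Rajdhani Express | Hyderabad - Delhi"),
     ("T2", "Shatabdi Express | Chennai - Bangalore"),
     ("F1", "Indigo 6E203 | Hyderabad - Dubai"),
     ("F2", "Air India AI102 | Delhi - Singapore"),
     ("H1", "Grand Palace | Chennai (Luxury)"),
     ("H2", "Budget Inn | Hyderabad (Budget)")]

def get_transport_details_alt (t_id : String) : String :=
  pvDetails.getD t_id "Transport Details"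

-- ===== PRECONDITION & SPEC =====
def Spec_get_transport_details (t_id : String) (out : String) : Prop := out = get_transport_details_alt t_id
instance (t_id : String) (out : String) : Decidable (Spec_get_transport_details t_id out) := by unfold Spec_get_transport_details; infer_instance

-- ===== CLAIM (what is proved, stated in full; the proofs are below) =====
def Claim_equal_get_transport_details : Prop := ∀ (t_id : String), Dom_get_transport_details t_id → Spec_get_transport_details t_id (get_transport_details t_id)

-- ===== LEMMAS AND PROOFS =====

-- ===== VERDICT (by name: the statement is the Claim_ definition above) =====
theorem get_transport_details_spec : Claim_equal_get_transport_details := by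
  intro t_id _
  unfold Spec_get_transport_details get_transport_details get_transport_details_alt
  by_cases h1 : t_id = "B1"; · subst h1; decide
  by_cases h2 : t_id = "B2"; · subst h2; decide
  by_cases h3 : t_id = "T1"; · subst h3; decide
  by_cases h4 : t_id = "T2"; · subst h4; decide
  by_cases h5 : t_id = "F1"; · subst h5; decide
  by_cases h6 : t_id = "F2"; · subst h6; decide
  by_cases h7 : t_id = "H1"; · subst h7; decide
  by_cases h8 : t_id = "H2"; · subst h8; decide
  simp [pvScanTransport, pvScanHotel, pvBusData, pvTrainData, pvFlightData, pvHotelData,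
        pvDetails, PySem.Dict.ofList, PySem.Dict.update, List.foldl,
        PySem.Dict.getD_insert, PySem.Dict.getD_empty,
        h1, h2, h3, h4, h5, h6, h7, h8,
        Ne.symm h1, Ne.symm h2, Ne.symm h3, Ne.symm h4,
        Ne.symm h5, Ne.symm h6, Ne.symm h7, Ne.symm h8]
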